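-- pv_equiv track=rewrite | github.com/thornxyz/resumeforge | code-agent/latex_processor.py | extract_explanation
-- ===== SOURCE A (Python) =====
-- from typing import Optional, List, Dict, Any
--
-- def extract_explanation(response: str) -> Optional[str]:
--     """Extract explanation text from response (before code blocks)"""
--     lines = []
--     for line in response.split("\n"):
--         if "```" in line:
--             break
--         if line.strip():
--             lines.append(line.strip())
--     return " ".join(lines) if lines else None
-- ===== SOURCE B (Python) =====
-- from typing import Optional
--
--
-- def extract_explanation(response: str) -> Optional[str]:
--     """Extract explanation text from response (before code blocks)"""
--     def go(lines: list) -> Optional[str]: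
--         if not lines or "```" in lines[0]:
--             return None
--         rest = go(lines[1:])
--         s = lines[0].strip()
--         if not s:
--             return rest
--         return s if rest is None else s + " " + rest
--     return go(response.split("\n"))
-- ===== Notes on version B (the rewrite author's own statement) =====
-- stated objective: alternative
-- what changed: Replaces A's loop that accumulates stripped lines into a list and finally joins them by a recursion over the lines that builds the joined string back-to-front through an Optional, with no accumulator list and no final join.
import Mathlib
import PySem

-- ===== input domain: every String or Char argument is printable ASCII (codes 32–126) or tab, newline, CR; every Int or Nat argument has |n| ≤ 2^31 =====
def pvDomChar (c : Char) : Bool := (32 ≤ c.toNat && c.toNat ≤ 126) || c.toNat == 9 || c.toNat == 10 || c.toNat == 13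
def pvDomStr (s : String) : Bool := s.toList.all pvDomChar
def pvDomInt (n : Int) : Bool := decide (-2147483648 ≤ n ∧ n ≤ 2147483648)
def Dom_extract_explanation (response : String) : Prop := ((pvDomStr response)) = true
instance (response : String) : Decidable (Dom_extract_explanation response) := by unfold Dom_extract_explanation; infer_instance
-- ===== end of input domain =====

-- B replaces A's accumulate-then-join loop by a recursion over the lines that builds the
-- joined string back-to-front through an Option, with no list accumulator and no final join (alternative; same cost).

-- ===== PORT A =====
-- A's for-loop with break and conditional append, as structural recursion over the lines.
def eeLoopA (acc : List String) : List String → List String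
  | [] => acc
  | l :: ls =>
    if PySem.Str.isIn "```" l then acc
    else if PySem.Str.strip l ≠ "" then eeLoopA (acc ++ [PySem.Str.strip l]) ls
    else eeLoopA acc ls

def extract_explanation (response : String) : Option String :=
  let lines := eeLoopA [] ((PySem.Str.split? response "\n").getD [])
  if lines ≠ [] then some (PySem.Str.join " " lines) else none

-- ===== PORT B =====
-- Source B's inner 'go': recursion on the line list; 's + " " + rest' is ported as join " " [s, rest].
def eeGo : List String → Option String
  | [] => none
  | l :: ls =>
    if PySem.Str.isIn "```" l then none
    else
      let rest := eeGo ls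
      let s := PySem.Str.strip l
      if s = "" then rest
      else match rest with
        | none => some s
        | some r => some (PySem.Str.join " " [s, r])

def extract_explanation_alt (response : String) : Option String :=
  eeGo ((PySem.Str.split? response "\n").getD [])

-- ===== PRECONDITION & SPEC =====
def Spec_extract_explanation (response : String) (out : Option String) : Prop := out = extract_explanation_alt response
instance (response : String) (out : Option String) : Decidable (Spec_extract_explanation response out) := by unfold Spec_extract_explanation; infer_instance

-- ===== CLAIM (what is proved, stated in full; the proofs are below) =====
def Claim_equal_extract_explanation : Prop := ∀ (response : String), Dom_extract_explanation response → Spec_extract_explanation response (extract_explanation response)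

-- ===== LEMMAS AND PROOFS =====
lemma str_join_singleton (s : String) : PySem.Str.join " " [s] = s := by
  apply String.toList_inj.mp; simp [PySem.Chars.join_singleton]

lemma str_join_merge (s r : String) (t : List String) :
    PySem.Str.join " " [s, PySem.Str.join " " (r :: t)] = PySem.Str.join " " (s :: r :: t) := by
  apply String.toList_inj.mp
  simp [PySem.Chars.join_cons_cons, PySem.Chars.join_singleton]

lemma eeLoopA_eq (ls : List String) : ∀ acc : List String,
    eeLoopA acc ls =
      acc ++ ((ls.takeWhile (fun l => !PySem.Str.isIn "```" l)).map PySem.Str.strip).filter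
        (fun s => s ≠ "") := by
  induction ls with
  | nil => intro acc; simp [eeLoopA]
  | cons l ls ih =>
    intro acc
    by_cases hf : PySem.Chars.isIn ['`', '`', '`'] l.toList = true
    · simp [eeLoopA, hf, List.takeWhile]
    · by_cases hs : PySem.Str.strip l = ""
      · simp [eeLoopA, hf, hs, List.takeWhile, ih]
      · simp [eeLoopA, hf, hs, List.takeWhile, ih]

lemma eeGo_eq (ls : List String) :
    eeGo ls =
      match ((ls.takeWhile (fun l => !PySem.Str.isIn "```" l)).map PySem.Str.strip).filter
          (fun s => s ≠ "") with
      | [] => none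
      | parts => some (PySem.Str.join " " parts) := by
  induction ls with
  | nil => simp [eeGo]
  | cons l ls ih =>
    by_cases hf : PySem.Chars.isIn ['`', '`', '`'] l.toList = true
    · simp [eeGo, hf, List.takeWhile]
    · by_cases hs : PySem.Str.strip l = ""
      · simp [eeGo, hf, hs, List.takeWhile, ih]
      · have hP : (((l :: ls).takeWhile (fun l => !PySem.Str.isIn "```" l)).map
            PySem.Str.strip).filter (fun s => s ≠ "") =
            PySem.Str.strip l ::
              (((ls.takeWhile (fun l => !PySem.Str.isIn "```" l)).map PySem.Str.strip).filter
                (fun s => s ≠ "")) := by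
          simp [List.takeWhile, hf, hs]
        rw [hP]
        simp only [eeGo]
        simp only [if_false, hs, ih]
        cases hrest : ((ls.takeWhile (fun l => !PySem.Str.isIn "```" l)).map PySem.Str.strip).filter
            (fun s => s ≠ "") with
        | nil => simp [str_join_singleton, eq_false_of_ne_true hf]
        | cons r rs => simp [str_join_merge, eq_false_of_ne_true hf]
-- ===== VERDICT (by name: the statement is the Claim_ definition above) =====
theorem extract_explanation_spec : Claim_equal_extract_explanation := by
  intro response _
  unfold Spec_extract_explanation extract_explanation extract_explanation_alt
  rw [eeLoopA_eq, eeGo_eq]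
  simp only [List.nil_append]
  cases h : ((((PySem.Str.split? response "\n").getD []).takeWhile
      (fun l => !PySem.Str.isIn "```" l)).map PySem.Str.strip).filter (fun s => s ≠ "") with
  | nil => simp
  | cons a t => simp
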